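-- pv_equiv track=rewrite | github.com/miliar/Code_Jam_Webscraper | solutions_python/Problem_157/625.py | ijkMult
-- ===== SOURCE A (Python) =====
-- def ijkMult(a,b):
--     if (a < 0):
--         return -ijkMult(-a,b)
--     elif (b < 0):
--         return -ijkMult(a,-b)
--     elif (a == 1):
--         return b
--     elif (b == 1):
--         return a
--     elif (a == b):
--         return -1
--     elif (a == 2 and b == 3):
--         return 4
--     elif (a == 2 and b == 4):
--         return -3
--     elif (a == 3 and b == 4):
--         return 2
--     else:
--         return -ijkMult(b,a)
-- ===== SOURCE B (Python) =====
-- def ijkMult(a, b):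
--     sign = 1
--     if a < 0:
--         sign, a = -sign, -a
--     if b < 0:
--         sign, b = -sign, -b
--     if a == 1:
--         return sign * b
--     if b == 1:
--         return sign * a
--     if a == b:
--         return -sign
--     if not (2 <= a <= 4 and 2 <= b <= 4):
--         raise ValueError("arguments must be quaternion units")
--     ia, ib = a - 2, b - 2
--     c = 3 - ia - ib
--     return sign * (c + 2) if (ib - ia) % 3 == 1 else -sign * (c + 2)
-- ===== Notes on version B (the rewrite author's own statement) =====
-- stated objective: simpler
-- what changed: A's recursive sign-stripping and branch table (with a swap-and-recurse fallback) is replaced by a non-recursive version: the sign is factored out of both arguments once, 1/equal cases are handled directly, inputs are validated (ValueError where A would recurse forever), and the remaining distinct-unit products come from index arithmetic (c = 3-ia-ib with a cyclic-order sign test) instead of a case table plus recursion.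
import Mathlib
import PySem

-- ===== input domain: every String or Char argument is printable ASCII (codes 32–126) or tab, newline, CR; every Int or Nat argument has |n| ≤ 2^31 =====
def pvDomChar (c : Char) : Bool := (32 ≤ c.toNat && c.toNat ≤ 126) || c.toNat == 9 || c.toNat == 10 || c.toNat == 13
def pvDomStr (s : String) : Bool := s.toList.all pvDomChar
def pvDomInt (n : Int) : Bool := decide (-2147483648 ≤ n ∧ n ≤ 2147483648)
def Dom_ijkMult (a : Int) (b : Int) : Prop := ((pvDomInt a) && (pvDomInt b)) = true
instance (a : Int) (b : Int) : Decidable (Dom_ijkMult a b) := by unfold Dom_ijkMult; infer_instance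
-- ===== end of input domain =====

-- B replaces A's recursive case table by a single sign factoring plus index arithmetic (simpler, non-recursive).
-- A does not terminate (RecursionError) on some inputs; Pre_ijkMult admits exactly the inputs where A returns.

-- ===== PORT A =====
-- A is recursive and diverges on some inputs (e.g. (0,2) swaps forever), so the port carries
-- a fuel counter; fuel 100 exceeds A's recursion depth (≤ 4) on every input admitted by Pre_ijkMult.
def ijkMultF : Nat → Int → Int → Int
  | 0, _, _ => 0
  | f + 1, a, b =>
    if a < 0 then -ijkMultF f (-a) b
    else if b < 0 then -ijkMultF f a (-b)
    else if a = 1 then b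
    else if b = 1 then a
    else if a = b then -1
    else if a = 2 ∧ b = 3 then 4
    else if a = 2 ∧ b = 4 then -3
    else if a = 3 ∧ b = 4 then 2
    else -ijkMultF f b a

def ijkMult (a : Int) (b : Int) : Int := ijkMultF 100 a b

-- ===== PORT B =====
def ijkMult_alt (a : Int) (b : Int) : Int :=
  let s1 : Int := if a < 0 then -1 else 1
  let a1 : Int := if a < 0 then -a else a
  let s : Int := if b < 0 then -s1 else s1
  let b1 : Int := if b < 0 then -b else b
  if a1 = 1 then s * b1
  else if b1 = 1 then s * a1
  else if a1 = b1 then -s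
  else if ¬ (2 ≤ a1 ∧ a1 ≤ 4 ∧ 2 ≤ b1 ∧ b1 ≤ 4) then 0  -- raise ValueError: unreachable under Pre_ijkMult
  else
    let ia := a1 - 2
    let ib := b1 - 2
    let c := 3 - ia - ib
    if PySem.Int.mod (ib - ia) 3 = 1 then s * (c + 2) else -(s * (c + 2))

-- ===== PRECONDITION & SPEC =====
-- Pre_ admits exactly the inputs on which Python A returns; on all others A raises
-- RecursionError (infinite swap/negate recursion), so they are excluded.
def Pre_ijkMult (a : Int) (b : Int) : Prop :=
  a.natAbs = 1 ∨ b.natAbs = 1 ∨ a.natAbs = b.natAbs ∨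
  ((a.natAbs = 2 ∨ a.natAbs = 3 ∨ a.natAbs = 4) ∧ (b.natAbs = 2 ∨ b.natAbs = 3 ∨ b.natAbs = 4))
instance (a : Int) (b : Int) : Decidable (Pre_ijkMult a b) := by unfold Pre_ijkMult; infer_instance

def pvWitness_ijkMult : Int × Int := (2, 3)

def Spec_ijkMult (a : Int) (b : Int) (out : Int) : Prop := out = ijkMult_alt a b
instance (a : Int) (b : Int) (out : Int) : Decidable (Spec_ijkMult a b out) := by unfold Spec_ijkMult; infer_instance

-- ===== CLAIM (what is proved, stated in full; the proofs are below) =====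
def Claim_equal_ijkMult : Prop := ∀ (a : Int) (b : Int), Dom_ijkMult a b → Pre_ijkMult a b → Spec_ijkMult a b (ijkMult a b)

-- ===== LEMMAS AND PROOFS =====

-- single unfolding steps of A's recursion for a negative argument
lemma stepL (f : Nat) (a b : Int) (ha : a < 0) :
    ijkMultF (f + 1) a b = -ijkMultF f (-a) b := by
  simp [ijkMultF, ha]

lemma stepR (f : Nat) (a b : Int) (ha : ¬ a < 0) (hb : b < 0) :
    ijkMultF (f + 1) a b = -ijkMultF f a (-b) := by
  simp [ijkMultF, ha, hb]

-- B flips its sign factor when an argument is negated.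
lemma alt_neg_left (a b : Int) (ha : a < 0) : ijkMult_alt a b = -ijkMult_alt (-a) b := by
  unfold ijkMult_alt
  have h1 : ¬ (-a) < 0 := by omega
  simp only [if_pos ha, if_neg h1]
  split_ifs <;> ring

lemma alt_neg_right (a b : Int) (ha : ¬ a < 0) (hb : b < 0) :
    ijkMult_alt a b = -ijkMult_alt a (-b) := by
  unfold ijkMult_alt
  have h1 : ¬ (-b) < 0 := by omega
  simp only [if_pos hb, if_neg h1, if_neg ha]
  split_ifs <;> ring

-- core agreement for nonnegative arguments inside Pre_
lemma pos_case (f : Nat) (a b : Int) (ha : 0 ≤ a) (hb : 0 ≤ b)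
    (hpre : Pre_ijkMult a b) : ijkMultF (f + 2) a b = ijkMult_alt a b := by
  have ha' : ¬ a < 0 := by omega
  have hb' : ¬ b < 0 := by omega
  unfold ijkMult_alt
  simp only [if_neg ha', if_neg hb']
  by_cases h1 : a = 1
  · subst h1; simp [ijkMultF, ha', hb']
  · by_cases h2 : b = 1
    · subst h2; simp [ijkMultF, ha', h1]
    · by_cases h3 : a = b
      · subst h3; simp [ijkMultF, ha', h1]
      · -- distinct units in {2,3,4}
        have hset : (a = 2 ∨ a = 3 ∨ a = 4) ∧ (b = 2 ∨ b = 3 ∨ b = 4) := by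
          unfold Pre_ijkMult at hpre; omega
        rcases hset.1 with rfl | rfl | rfl <;> rcases hset.2 with rfl | rfl | rfl <;>
          simp_all [ijkMultF, PySem.Int.mod]

lemma pre_neg_left (a b : Int) : Pre_ijkMult (-a) b ↔ Pre_ijkMult a b := by
  unfold Pre_ijkMult; simp

lemma pre_neg_right (a b : Int) : Pre_ijkMult a (-b) ↔ Pre_ijkMult a b := by
  unfold Pre_ijkMult; simp

-- ===== VERDICT (by name: the statement is the Claim_ definition above) =====
theorem ijkMult_spec : Claim_equal_ijkMult := by
  intro a b _ hpre
  unfold Spec_ijkMult ijkMult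
  by_cases ha : a < 0
  · rw [(rfl : ijkMultF 100 a b = ijkMultF (99 + 1) a b), stepL 99 a b ha,
      alt_neg_left a b ha]
    by_cases hb : b < 0
    · rw [(rfl : ijkMultF 99 (-a) b = ijkMultF (98 + 1) (-a) b),
        stepR 98 (-a) b (by omega) hb, alt_neg_right (-a) b (by omega) hb]
      have : ijkMultF 98 (-a) (-b) = ijkMult_alt (-a) (-b) := by
        exact pos_case 96 (-a) (-b) (by omega) (by omega)
          (by rw [pre_neg_left, pre_neg_right]; exact hpre)
      rw [this]
    · have : ijkMultF 99 (-a) b = ijkMult_alt (-a) b := by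
        exact pos_case 97 (-a) b (by omega) (by omega)
          (by rw [pre_neg_left]; exact hpre)
      rw [this]
  · by_cases hb : b < 0
    · rw [(rfl : ijkMultF 100 a b = ijkMultF (99 + 1) a b),
        stepR 99 a b ha hb, alt_neg_right a b ha hb]
      have : ijkMultF 99 a (-b) = ijkMult_alt a (-b) := by
        exact pos_case 97 a (-b) (by omega) (by omega)
          (by rw [pre_neg_right]; exact hpre)
      rw [this]
    · exact pos_case 98 a b (by omega) (by omega) hpre
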